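-- pv_equiv track=rewrite | github.com/981377660LMT/algorithm-study | 4_set/有序集合/考场就座/社交距离.py | solve
-- ===== SOURCE A (Python) =====
-- def solve(s, k):
--     """是否存在一个座位使得距离每个人至少k"""
--     groups = [len(g) for g in s.split('x')]
--     for i, gSize in enumerate(groups):
--         if i == 0 or i == len(groups) - 1:
--             if gSize >= k:
--                 return True
--         elif gSize >= 2 * k - 1:
--             return True
--     return False
-- ===== SOURCE B (Python) =====
-- def solve(s, k):
--     """是否存在一个座位使得距离每个人至少k"""
--     run = 0
--     seen = False
--     for ch in s:
--         if ch == 'x':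
--             if (not seen and run >= k) or (seen and run >= 2 * k - 1):
--                 return True
--             seen = True
--             run = 0
--         else:
--             run += 1
--     return run >= k
-- ===== Notes on version B (the rewrite author's own statement) =====
-- stated objective: alternative
-- what changed: B replaces A's split-into-groups-then-indexed-scan with a single character-by-character pass that tracks the current gap length and a seen-an-x flag, returning early at the first satisfying gap; no group list is materialized.
import Mathlib
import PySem

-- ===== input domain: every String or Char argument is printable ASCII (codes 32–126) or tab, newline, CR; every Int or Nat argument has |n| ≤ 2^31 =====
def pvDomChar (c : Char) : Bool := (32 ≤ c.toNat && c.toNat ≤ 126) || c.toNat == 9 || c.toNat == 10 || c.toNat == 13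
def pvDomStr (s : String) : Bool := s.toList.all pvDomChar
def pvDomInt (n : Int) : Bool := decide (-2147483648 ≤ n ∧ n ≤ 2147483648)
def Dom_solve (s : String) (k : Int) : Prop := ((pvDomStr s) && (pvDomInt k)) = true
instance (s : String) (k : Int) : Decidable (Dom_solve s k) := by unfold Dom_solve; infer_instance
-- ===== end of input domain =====

-- B replaces A's split-into-groups-then-indexed-scan with a single character pass
-- tracking the current gap length and a seen-an-x flag (objective: alternative; same O(n) cost).

-- ===== PORT A =====
-- the 'for i, gSize in enumerate(groups)' loop with its early returns
def solveGoA (k : Int) (n : Nat) : List Int → Nat → Bool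
  | [], _ => false
  | g :: rest, i =>
    if i = 0 || i = n - 1 then
      if g ≥ k then true else solveGoA k n rest (i + 1)
    else if g ≥ 2 * k - 1 then true else solveGoA k n rest (i + 1)

def solve (s : String) (k : Int) : Bool :=
  let groups : List Int := (PySem.Chars.splitOn s.toList ['x']).map (fun g => (g.length : Int))
  solveGoA k groups.length groups 0

-- ===== PORT B =====
-- Source B's for-loop over the characters; state = (seen, run); the final 'return run >= k'
def solveGoB (k : Int) (seen : Bool) (run : Int) : List Char → Bool
  | [] => decide (run ≥ k)
  | c :: cs =>
    if c = 'x' then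
      if (!seen && decide (run ≥ k)) || (seen && decide (run ≥ 2 * k - 1)) then true
      else solveGoB k true 0 cs
    else solveGoB k seen (run + 1) cs

def solve_alt (s : String) (k : Int) : Bool :=
  solveGoB k false 0 s.toList

-- ===== PRECONDITION & SPEC =====
def Spec_solve (s : String) (k : Int) (out : Bool) : Prop := out = solve_alt s k
instance (s : String) (k : Int) (out : Bool) : Decidable (Spec_solve s k out) := by unfold Spec_solve; infer_instance

-- ===== CLAIM (what is proved, stated in full; the proofs are below) =====
def Claim_equal_solve : Prop := ∀ (s : String) (k : Int), Dom_solve s k → Spec_solve s k (solve s k)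

-- ===== LEMMAS AND PROOFS =====

-- proof-side recursive characterization of splitting on the single character 'x'
def splitChar : List Char → List (List Char)
  | [] => [[]]
  | c :: cs =>
    if c = 'x' then [] :: splitChar cs
    else
      match splitChar cs with
      | [] => [[c]]
      | h :: t => (c :: h) :: t

lemma splitChar_ne_nil (cs : List Char) : splitChar cs ≠ [] := by
  cases cs with
  | nil => simp [splitChar]
  | cons c cs =>
    simp only [splitChar]
    split
    · simp
    · split <;> simp

lemma splitChar_x (cs : List Char) : splitChar ('x' :: cs) = [] :: splitChar cs := by
  simp [splitChar]

lemma splitChar_notx {c : Char} (hc : c ≠ 'x') (cs : List Char) {h1 : List Char}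
    {t1 : List (List Char)} (hs : splitChar cs = h1 :: t1) :
    splitChar (c :: cs) = (c :: h1) :: t1 := by
  simp [splitChar, hc, hs]

-- prepend 'pre' onto the first piece
def consify (pre : List Char) : List (List Char) → List (List Char)
  | [] => [pre]
  | h :: t => (pre ++ h) :: t

lemma splitOn_go_spec (l : List Char) : ∀ (fuel : Nat) (cur : List Char) (acc : List (List Char)),
    l.length < fuel →
    PySem.Chars.splitOn.go ['x'] fuel l cur acc = acc.reverse ++ consify cur.reverse (splitChar l) := by
  induction l with
  | nil =>
    intro fuel cur acc h
    match fuel, h with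
    | fuel + 1, _ => simp [PySem.Chars.splitOn.go, splitChar, consify]
  | cons c rest ih =>
    intro fuel cur acc h
    match fuel, h with
    | fuel + 1, h =>
      by_cases hc : c = 'x'
      · subst hc
        have hp : List.isPrefixOf ['x'] ('x' :: rest) = true := by
          simp [List.isPrefixOf]
        rw [PySem.Chars.splitOn.go, if_pos hp]
        simp only [List.length_cons, List.length_nil, List.drop_succ_cons, List.drop_zero]
        rw [ih fuel [] (cur.reverse :: acc) (by simpa using Nat.lt_of_succ_lt_succ h)]
        rw [splitChar_x]
        rcases hs : splitChar rest with _ | ⟨h1, t1⟩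
        · exact absurd hs (splitChar_ne_nil rest)
        · simp [consify]
      · have hp : List.isPrefixOf ['x'] (c :: rest) = false := by
          simp [List.isPrefixOf]
          exact fun h' => hc h'.symm
        rw [PySem.Chars.splitOn.go, if_neg (by simp [hp])]
        rw [ih fuel (c :: cur) acc (by simpa using Nat.lt_of_succ_lt_succ h)]
        rcases hs : splitChar rest with _ | ⟨h1, t1⟩
        · exact absurd hs (splitChar_ne_nil rest)
        · rw [splitChar_notx hc rest hs]
          simp [consify]

lemma splitOn_eq_splitChar (cs : List Char) :
    PySem.Chars.splitOn cs ['x'] = splitChar cs := by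
  unfold PySem.Chars.splitOn
  rw [splitOn_go_spec cs (cs.length + 1) [] [] (Nat.lt_succ_self _)]
  rcases hs : splitChar cs with _ | ⟨h1, t1⟩
  · exact absurd hs (splitChar_ne_nil cs)
  · simp [consify]

-- the value of A's loop on the interior groups (the non-first groups)
def innerI (k : Int) : List Int → Bool
  | [] => false
  | [g] => decide (g ≥ k)
  | g :: rest => decide (g ≥ 2 * k - 1) || innerI k rest

-- the value of A's loop on the whole group list
def topI (k : Int) : List Int → Bool
  | [] => false
  | [g] => decide (g ≥ k)
  | g :: rest => decide (g ≥ k) || innerI k rest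

lemma innerI_one (k g : Int) : innerI k [g] = decide (g ≥ k) := rfl
lemma innerI_cons2 (k g g2 : Int) (t : List Int) :
    innerI k (g :: g2 :: t) = (decide (g ≥ 2 * k - 1) || innerI k (g2 :: t)) := rfl
lemma topI_one (k g : Int) : topI k [g] = decide (g ≥ k) := rfl
lemma topI_cons2 (k g g2 : Int) (t : List Int) :
    topI k (g :: g2 :: t) = (decide (g ≥ k) || innerI k (g2 :: t)) := rfl

lemma solveGoA_inner (k : Int) : ∀ (rest : List Int) (i : Nat), 1 ≤ i →
    solveGoA k (i + rest.length) rest i = innerI k rest := by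
  intro rest
  induction rest with
  | nil => intro i _; simp [solveGoA, innerI]
  | cons g rest ih =>
    intro i hi
    cases rest with
    | nil =>
      rw [solveGoA, if_pos (by simp)]
      rw [innerI_one]
      by_cases h : g ≥ k
      · simp [h]
      · simp [h, solveGoA]
    | cons g2 t =>
      rw [show i + (g :: g2 :: t).length = (i + 1) + (g2 :: t).length by
        simp [List.length_cons]; omega]
      rw [solveGoA, if_neg (by simp [List.length_cons]; omega)]
      rw [ih (i + 1) (by omega)]
      rw [innerI_cons2]
      by_cases h : g ≥ 2 * k - 1 <;> simp [h]

lemma solveGoA_top (k : Int) (gs : List Int) :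
    solveGoA k gs.length gs 0 = topI k gs := by
  cases gs with
  | nil => simp [solveGoA, topI]
  | cons g rest =>
    cases rest with
    | nil =>
      rw [solveGoA, if_pos (by simp)]
      rw [topI_one]
      by_cases h : g ≥ k
      · simp [h]
      · simp [h, solveGoA]
    | cons g2 t =>
      rw [show (g :: g2 :: t).length = 1 + (g2 :: t).length by simp [List.length_cons]; omega]
      rw [solveGoA, if_pos (by simp)]
      rw [show (0 : Nat) + 1 = 1 by rfl]
      rw [solveGoA_inner k (g2 :: t) 1 le_rfl]
      rw [topI_cons2]
      by_cases h : g ≥ k <;> simp [h]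

-- attach the running gap length 'run' to the first piece's length
def addHead (run : Int) : List Int → List Int
  | [] => [run]
  | h :: t => (run + h) :: t

lemma solveGoB_spec (k : Int) : ∀ (cs : List Char) (run : Int),
    (solveGoB k false run cs = topI k (addHead run ((splitChar cs).map (fun g => ((g.length : Nat) : Int))))) ∧
    (solveGoB k true run cs = innerI k (addHead run ((splitChar cs).map (fun g => ((g.length : Nat) : Int))))) := by
  intro cs
  induction cs with
  | nil => intro run; simp [solveGoB, splitChar, addHead, topI, innerI]
  | cons c cs ih =>
    intro run
    rcases hs : splitChar cs with _ | ⟨h1, t1⟩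
    · exact absurd hs (splitChar_ne_nil cs)
    by_cases hc : c = 'x'
    · subst hc
      have ih1 := (ih 0).2
      rw [hs] at ih1
      simp only [List.map_cons, addHead, zero_add] at ih1
      rw [splitChar_x, hs]
      simp only [List.map_cons, List.length_nil, Nat.cast_zero, addHead, add_zero]
      constructor
      · rw [solveGoB, if_pos rfl]
        simp only [Bool.not_false, Bool.true_and, Bool.false_and, Bool.or_false]
        rw [ih1, topI_cons2]
        by_cases hr : run ≥ k <;> simp [hr]
      · rw [solveGoB, if_pos rfl]
        simp only [Bool.not_true, Bool.false_and, Bool.true_and, Bool.false_or]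
        rw [ih1, innerI_cons2]
        by_cases hr : run ≥ 2 * k - 1 <;> simp [hr]
    · have ihr := ih (run + 1)
      rw [hs] at ihr
      simp only [List.map_cons, addHead] at ihr
      rw [splitChar_notx hc cs hs]
      simp only [List.map_cons, List.length_cons, addHead]
      have harith : run + (((h1.length + 1 : Nat) : Int)) = run + 1 + (h1.length : Int) := by
        push_cast; ring
      rw [harith]
      constructor
      · rw [solveGoB, if_neg hc]
        exact ihr.1
      · rw [solveGoB, if_neg hc]
        exact ihr.2

-- ===== VERDICT (by name: the statement is the Claim_ definition above) =====
theorem solve_spec : Claim_equal_solve := by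
  intro s k _
  show solve s k = solve_alt s k
  unfold solve solve_alt
  rw [splitOn_eq_splitChar, solveGoA_top]
  rw [(solveGoB_spec k s.toList 0).1]
  congr 1
  rcases hs : splitChar s.toList with _ | ⟨h1, t1⟩
  · exact absurd hs (splitChar_ne_nil s.toList)
  · simp [addHead]
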